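-- pv_equiv track=rewrite | github.com/mooyeon-choi/TIL | problemSolving/programmers/level_4_python/3차자동완성.py | solution
-- ===== SOURCE A (Python) =====
-- def solution(words):
--     words.sort()
--     idx = 0
--     end = len(words)
--     result = [0]*end
--     while idx < end - 1:
--         for i in range(result[idx], len(words[idx])):
--             for j in range(idx, end):
--                 if i >= len(words[j]):
--                     break
--                 if words[j][i] != words[idx][i]:
--                     break
--                 result[j] += 1
--                 if j < end - 1 and result[j] > result[j+1] + 1:
--                     break
--             if result[idx] > result[idx+1]:
--                 break
--         idx += 1
--     return sum(result) + 1
-- ===== SOURCE B (Python) =====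
-- def lcp(a, b):
--     k = 0
--     m = min(len(a), len(b))
--     while k < m and a[k] == b[k]:
--         k += 1
--     return k
--
--
-- def solution(words):
--     ws = sorted(words)
--     n = len(ws)
--     l = [lcp(ws[j], ws[j + 1]) for j in range(n - 1)]
--     total = 1
--     for j in range(n - 1):
--         prev = l[j - 1] if j > 0 else 0
--         total += min(len(ws[j]), max(prev, l[j]) + 1)
--     if n >= 2:
--         total += l[n - 2]
--     return total
-- ===== Notes on version B (the rewrite author's own statement) =====
-- stated objective: alternative
-- what changed: Replaces the nested index loops with break-coupled counters by a single closed-form pass over the sorted list: each adjacent longest-common-prefix is computed once and each word contributes min(len, max(lcp with left neighbour, lcp with right neighbour)+1), the largest word contributing its left lcp plus the trailing 1.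
import Mathlib
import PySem

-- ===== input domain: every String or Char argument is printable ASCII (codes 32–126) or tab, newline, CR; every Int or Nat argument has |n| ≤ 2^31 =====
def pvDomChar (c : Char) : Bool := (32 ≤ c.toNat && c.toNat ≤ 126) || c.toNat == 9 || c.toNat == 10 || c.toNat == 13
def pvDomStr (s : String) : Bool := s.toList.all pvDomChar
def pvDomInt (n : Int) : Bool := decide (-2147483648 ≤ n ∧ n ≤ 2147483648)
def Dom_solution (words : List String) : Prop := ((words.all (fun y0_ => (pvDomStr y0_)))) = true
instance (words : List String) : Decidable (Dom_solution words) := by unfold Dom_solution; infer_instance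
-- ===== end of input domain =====

-- B replaces A's nested break-coupled index loops by one pass over the sorted list that sums
-- each adjacent longest-common-prefix contribution in closed form (A also sorts its argument in
-- place, B does not mutate it — the equivalence proved here is about the return value only).


-- ===== PORT A =====
-- 'for j in range(idx, end)' body with its three breaks; structural recursion on the exact
-- remaining iteration count fuel = n - j (the 'j < n' loop test), j always < n when accessed
def pyJloop (ws : List String) (n k : Nat) (i : Int) : Nat → Nat → List Int → List Int
  | 0, _, result => result
  | fuel + 1, j, result =>
    if PySem.Str.len (ws.getD j "") ≤ i then result            -- 'if i >= len(words[j]): break'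
    else if PySem.Str.pyGet? (ws.getD j "") i ≠ PySem.Str.pyGet? (ws.getD k "") i then result
    else
      let r := result.set j (result.getD j 0 + 1)              -- 'result[j] += 1'
      if j + 1 < n ∧ r.getD (j+1) 0 + 1 < r.getD j 0 then r    -- 'if j < end-1 and result[j] > result[j+1]+1: break'
      else pyJloop ws n k i fuel (j+1) r

-- 'for i in range(result[idx], len(words[idx]))' with its break; bounds evaluated once,
-- fuel = (L - i).toNat = the exact number of remaining iterations (the 'i < L' loop test)
def pyIloop (ws : List String) (n k : Nat) (L : Int) : Nat → Int → List Int → List Int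
  | 0, _, result => result
  | fuel + 1, i, result =>
    let r := pyJloop ws n k i (n - k) k result
    if r.getD (k+1) 0 < r.getD k 0 then r                      -- 'if result[idx] > result[idx+1]: break'
    else pyIloop ws n k L fuel (i+1) r

-- 'while idx < end - 1'; fuel = n - 1 - k remaining iterations (the loop test, kept explicitly)
def pyWloop (ws : List String) (n : Nat) : Nat → Nat → List Int → List Int
  | 0, _, result => result
  | fuel + 1, k, result =>
    if k + 1 < n then
      let s := result.getD k 0
      let L := PySem.Str.len (ws.getD k "")
      pyWloop ws n fuel (k+1) (pyIloop ws n k L (L - s).toNat s result)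
    else result

def solution (words : List String) : Int :=
  -- words.sort(): Python compares strings lexicographically by code points = List Char order of toList
  let ws := PySem.List.sorted words (fun s => s.toList) false
  let n := ws.length
  (pyWloop ws n n 0 (List.replicate n (0 : Int))).sum + 1      -- 'return sum(result) + 1'

-- ===== PORT B =====
-- Source B's helper lcp(a, b): length of the longest common prefix (while-loop over k, structurally)
def lcpChars : List Char → List Char → Nat
  | a :: as, b :: bs => if a = b then lcpChars as bs + 1 else 0
  | _, _ => 0

def solution_alt (words : List String) : Int :=
  let ws := PySem.List.sorted words (fun s => s.toList) false
  let n := ws.length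
  let l := (List.range (n - 1)).map (fun j => lcpChars (ws.getD j "").toList (ws.getD (j+1) "").toList)
  let total := (List.range (n - 1)).foldl (fun total j =>
    let prev : Nat := if 0 < j then l.getD (j-1) 0 else 0
    total + (min (ws.getD j "").toList.length (max prev (l.getD j 0) + 1) : Int)) 1
  if 2 ≤ n then total + (l.getD (n-2) 0 : Int) else total

-- ===== PRECONDITION & SPEC =====
def Spec_solution (words : List String) (out : Int) : Prop := out = solution_alt words
instance (words : List String) (out : Int) : Decidable (Spec_solution words out) := by unfold Spec_solution; infer_instance

-- ===== CLAIM (what is proved, stated in full; the proofs are below) =====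
def Claim_equal_solution : Prop := ∀ (words : List String), Dom_solution words → Spec_solution words (solution words)

-- ===== LEMMAS AND PROOFS =====

-- spec-side abbreviations over the sorted list
def Wc (ws : List String) (j : Nat) : List Char := (ws.getD j "").toList
def Cc (ws : List String) (a b : Nat) : Nat := lcpChars (Wc ws a) (Wc ws b)
def fV (ws : List String) (j : Nat) : Nat :=
  min (Wc ws j).length (max (if j = 0 then 0 else Cc ws (j-1) j) (Cc ws j (j+1)) + 1)

-- loop states of A, as explicit functions of the loop counters
def stA (ws : List String) (k : Nat) : List Int :=
  (List.range ws.length).map (fun j => if j < k then (fV ws j : Int)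
    else if k = 0 then 0 else (Cc ws (k-1) j : Int))
def stI (ws : List String) (k i : Nat) : List Int :=
  (List.range ws.length).map (fun j => if j < k then (fV ws j : Int)
    else if j = k then (i : Int) else (min i (Cc ws k j) : Int))
def stJ (ws : List String) (k i j : Nat) : List Int :=
  (List.range ws.length).map (fun j' => if j' < k then (fV ws j' : Int)
    else if j' < j then (min (i+1) (Cc ws k j') : Int)
    else if j' = k then (i : Int) else (min i (Cc ws k j') : Int))

-- basic lcp facts
theorem lcp_le_left (a b : List Char) : lcpChars a b ≤ a.length := by
  induction a generalizing b with
  | nil => cases b <;> simp [lcpChars]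
  | cons x as ih =>
    cases b with
    | nil => simp [lcpChars]
    | cons y bs =>
      simp only [lcpChars, List.length_cons]
      split
      · have := ih bs; omega
      · omega

theorem lcp_comm (a b : List Char) : lcpChars a b = lcpChars b a := by
  induction a generalizing b with
  | nil => cases b <;> simp [lcpChars]
  | cons x as ih =>
    cases b with
    | nil => simp [lcpChars]
    | cons y bs =>
      simp only [lcpChars]
      by_cases h : x = y
      · subst h; simp [ih]
      · simp [h, Ne.symm h]

theorem lcp_le_right (a b : List Char) : lcpChars a b ≤ b.length := by
  rw [lcp_comm]; exact lcp_le_left b a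

theorem lcp_self (a : List Char) : lcpChars a a = a.length := by
  induction a with
  | nil => simp [lcpChars]
  | cons x as ih => simp [lcpChars, ih]

theorem lcp_get_eq (a b : List Char) (k : Nat) (h : k < lcpChars a b) :
    a.getD k ' ' = b.getD k ' ' := by
  induction a generalizing b k with
  | nil => simp [lcpChars] at h
  | cons x as ih =>
    cases b with
    | nil => simp [lcpChars] at h
    | cons y bs =>
      simp only [lcpChars] at h
      by_cases hxy : x = y
      · subst hxy
        simp only [if_true] at h
        cases k with
        | zero => rfl
        | succ k' =>
          simp only [List.getD_cons_succ]
          exact ih bs k' (by simpa using h)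
      · simp [hxy] at h

theorem lcp_get_ne (a b : List Char) (h1 : lcpChars a b < a.length) (h2 : lcpChars a b < b.length) :
    a.getD (lcpChars a b) ' ' ≠ b.getD (lcpChars a b) ' ' := by
  induction a generalizing b with
  | nil => simp at h1
  | cons x as ih =>
    cases b with
    | nil => simp at h2
    | cons y bs =>
      by_cases hxy : x = y
      · subst hxy
        simp only [lcpChars, if_true] at h1 h2 ⊢
        simp only [List.length_cons] at h1 h2
        have := ih bs (by omega) (by omega)
        simpa using this
      · simp [lcpChars, hxy]

theorem le_head_cases (x y : Char) (a b : List Char) (h : (x :: a) ≤ (y :: b)) :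
    x < y ∨ (x = y ∧ a ≤ b) := by
  rcases h.lt_or_eq with h | h
  · cases h with
    | cons h => exact Or.inr ⟨rfl, le_of_lt h⟩
    | rel h => exact Or.inl h
  · cases h; exact Or.inr ⟨rfl, le_rfl⟩

theorem not_cons_le_nil (x : Char) (a : List Char) (h : (x :: a) ≤ ([] : List Char)) : False := by
  rcases h.lt_or_eq with h | h
  · cases h
  · cases h

-- the sorted-chain fact: for a ≤ b ≤ c, lcp(a,c) = min (lcp(a,b)) (lcp(b,c))
theorem lcp_min (a b c : List Char) (h1 : a ≤ b) (h2 : b ≤ c) :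
    lcpChars a c = min (lcpChars a b) (lcpChars b c) := by
  induction a generalizing b c with
  | nil => cases c <;> cases b <;> simp [lcpChars]
  | cons x as ih =>
    cases b with
    | nil => exact absurd h1 (fun h => not_cons_le_nil _ _ h)
    | cons y bs =>
      cases c with
      | nil => exact absurd h2 (fun h => not_cons_le_nil _ _ h)
      | cons z cs =>
        rcases le_head_cases _ _ _ _ h1 with hxy | ⟨hxy, hab⟩
        · have hxz : x ≠ z := by
            rcases le_head_cases _ _ _ _ h2 with hyz | ⟨hyz, _⟩
            · exact ne_of_lt (lt_trans hxy hyz)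
            · exact hyz ▸ ne_of_lt hxy
          simp [lcpChars, ne_of_lt hxy, hxz]
        · subst hxy
          rcases le_head_cases _ _ _ _ h2 with hyz | ⟨hyz, hbc⟩
          · simp [lcpChars, ne_of_lt hyz]
          · subst hyz
            simp only [lcpChars, if_true]
            rw [ih bs cs hab hbc]
            omega

def SortedW (ws : List String) : Prop := ws.Pairwise (fun a b => a.toList ≤ b.toList)

theorem sorted_le (ws : List String) (hp : SortedW ws) {a b : Nat} (hab : a ≤ b)
    (hb : b < ws.length) : Wc ws a ≤ Wc ws b := by
  rcases lt_or_eq_of_le hab with h | h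
  · have := (List.pairwise_iff_getElem.mp hp) a b (lt_of_le_of_lt hab hb) hb h
    unfold Wc
    rwa [List.getD_eq_getElem _ _ (lt_of_le_of_lt hab hb), List.getD_eq_getElem _ _ hb]
  · subst h; exact le_rfl

theorem cc_chain (ws : List String) (hp : SortedW ws) {a b c : Nat} (h1 : a ≤ b) (h2 : b ≤ c)
    (hc : c < ws.length) : Cc ws a c = min (Cc ws a b) (Cc ws b c) := by
  exact lcp_min _ _ _ (sorted_le ws hp h1 (lt_of_le_of_lt h2 hc)) (sorted_le ws hp h2 hc)

theorem cc_mono (ws : List String) (hp : SortedW ws) {k a b : Nat} (hka : k ≤ a) (hab : a ≤ b)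
    (hb : b < ws.length) : Cc ws k b ≤ Cc ws k a := by
  rw [cc_chain ws hp hka hab hb]; exact min_le_left _ _

theorem set_map_range {β : Type} (n j : Nat) (v : β) (f : Nat → β) (_hj : j < n) :
    ((List.range n).map f).set j v = (List.range n).map (fun t => if t = j then v else f t) := by
  apply List.ext_getElem
  · simp
  · intro t h1 h2
    simp only [List.getElem_set, List.getElem_map, List.getElem_range]
    simp only [List.length_set, List.length_map, List.length_range] at h1
    by_cases h : j = t
    · simp [h]
    · simp [h, Ne.symm h]

-- pointwise description of the states
theorem stJ_getD (ws : List String) (k i j t : Nat) (ht : t < ws.length) :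
    (stJ ws k i j).getD t 0 = if t < k then (fV ws t : Int)
      else if t < j then (min (i+1) (Cc ws k t) : Int)
      else if t = k then (i : Int) else (min i (Cc ws k t) : Int) :=
  PySem.List.getD_map_range _ _ _ _ ht

theorem stJ_succ_eq_stI (ws : List String) (k i j : Nat) (hk : k < ws.length)
    (hik : i < (Wc ws k).length) (hkj : k < j ∨ j = ws.length ∨ (k ≤ j ∧ Cc ws k j ≤ i))
    (hcut : ∀ t, j ≤ t → t < ws.length → Cc ws k t ≤ i) :
    stJ ws k i j = stI ws k (i+1) := by
  apply List.map_congr_left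
  intro t htm
  have ht : t < ws.length := List.mem_range.mp htm
  have hlen : Cc ws k k = (Wc ws k).length := lcp_self _
  by_cases h1 : t < k
  · simp [h1]
  · by_cases h2 : t < j
    · by_cases h3 : t = k
      · subst h3; simp only [h1, if_false, h2, if_true]
        push_cast
        omega
      · simp [h1, h2, h3]
    · -- t ≥ j : untouched, but values agree because Cc ws k t ≤ i
      have hle : Cc ws k t ≤ i := hcut t (by omega) ht
      have h3 : t ≠ k := by
        intro h; subst h; omega
      simp only [h1, if_false, h2, if_false, h3, if_false]
      push_cast
      omega

theorem pyGet_bridge (ws : List String) (j i : Nat) (hi : i < (Wc ws j).length) :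
    PySem.Str.pyGet? (ws.getD j "") (i : Int) = some ((Wc ws j).getD i ' ') := by
  rw [PySem.Str.pyGet?_natCast]
  show (Wc ws j)[i]? = _
  rw [List.getElem?_eq_getElem hi, List.getD_eq_getElem _ _ hi]

theorem jloop_go (ws : List String) (hp : SortedW ws) (n k i : Nat) (hn : n = ws.length)
    (hk : k < n) (hik : i < (Wc ws k).length) :
    ∀ m j, n - j = m → k ≤ j → j ≤ n →
      (∀ j', k ≤ j' → j' < j → i + 1 ≤ Cc ws k j') →
      (j < n → i ≤ Cc ws k j) →
      pyJloop ws n k (i : Int) (n - j) j (stJ ws k i j) = stI ws k (i+1) := by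
  subst hn
  intro m
  induction m with
  | zero =>
    intro j hm hkj hjn _ _
    have hj : j = ws.length := by omega
    rw [hm]
    show stJ ws k i j = stI ws k (i+1)
    exact stJ_succ_eq_stI ws k i j hk hik (Or.inr (Or.inl hj)) (fun t h1 h2 => by omega)
  | succ m ih =>
    intro j hm hkj hjn hchain hentry
    have hjn' : j < ws.length := by omega
    have hccj : i ≤ Cc ws k j := hentry hjn'
    have hlenj : Cc ws k j ≤ (Wc ws j).length := lcp_le_right _ _
    have hlenk : Cc ws k j ≤ (Wc ws k).length := lcp_le_left _ _
    have hcckk : Cc ws k k = (Wc ws k).length := lcp_self _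
    rw [hm]
    by_cases hstrict : i + 1 ≤ Cc ws k j
    · -- match at column i: increment, maybe break on the counter condition
      have hc1 : ¬ (PySem.Str.len (ws.getD j "") ≤ (i : Int)) := by
        rw [PySem.Str.len_eq]
        have : i < (Wc ws j).length := by omega
        exact_mod_cast not_le.mpr (by exact_mod_cast this)
      have hgj : PySem.Str.pyGet? (ws.getD j "") (i : Int) = some ((Wc ws j).getD i ' ') :=
        pyGet_bridge ws j i (by omega)
      have hgk : PySem.Str.pyGet? (ws.getD k "") (i : Int) = some ((Wc ws k).getD i ' ') :=
        pyGet_bridge ws k i hik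
      have hc2 : ¬ (PySem.Str.pyGet? (ws.getD j "") (i : Int) ≠ PySem.Str.pyGet? (ws.getD k "") (i : Int)) := by
        rw [hgj, hgk]
        have hr : Cc ws k j = lcpChars (Wc ws k) (Wc ws j) := rfl
        have := lcp_get_eq (Wc ws k) (Wc ws j) i (by omega)
        simp only [ne_eq, Option.some.injEq, not_not]
        exact this.symm
      have hgetj : (stJ ws k i j).getD j 0 = (i : Int) := by
        rw [stJ_getD ws k i j j hjn']
        have h1 : ¬ j < k := by omega
        have h2 : ¬ j < j := by omega
        by_cases h3 : j = k
        · simp [h1, h2, h3]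
        · simp only [h1, if_false, h2, if_false, h3, if_false]
          push_cast
          omega
      have hset : (stJ ws k i j).set j ((stJ ws k i j).getD j 0 + 1) = stJ ws k i (j+1) := by
        rw [hgetj]
        unfold stJ
        rw [set_map_range _ j _ _ hjn']
        apply List.map_congr_left
        intro t htm
        have ht : t < ws.length := List.mem_range.mp htm
        by_cases h : t = j
        · subst h
          have h1 : ¬ t < k := by omega
          have h2 : t < t + 1 := by omega
          simp only [if_pos rfl, h1, if_false, if_pos h2]
          push_cast
          omega
        · simp only [if_neg h]
          by_cases h1 : t < k
          · simp [h1]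
          · by_cases h2 : t < j
            · have h2' : t < j + 1 := by omega
              simp [h1, h2, h2']
            · have h2' : ¬ t < j + 1 := by omega
              simp [h1, h2, h2']
      simp only [pyJloop, if_neg hc1, if_neg hc2, hset]
      have hgetj1 : (stJ ws k i (j+1)).getD j 0 = ((i : Int) + 1) := by
        rw [stJ_getD ws k i (j+1) j hjn']
        have h1 : ¬ j < k := by omega
        have h2 : j < j + 1 := by omega
        simp only [h1, if_false, if_pos h2]
        push_cast
        omega
      by_cases hbr : j + 1 < ws.length ∧ Cc ws k (j+1) < i
      · have hgetj2 : (stJ ws k i (j+1)).getD (j+1) 0 = (min i (Cc ws k (j+1)) : Int) := by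
          rw [stJ_getD ws k i (j+1) (j+1) hbr.1]
          have h1 : ¬ j + 1 < k := by omega
          have h2 : ¬ j + 1 < j + 1 := by omega
          have h3 : j + 1 ≠ k := by omega
          simp [h1, h2, h3]
        rw [if_pos]
        · apply stJ_succ_eq_stI ws k i (j+1) hk hik (Or.inl (by omega))
          intro t h1t h2t
          have := cc_mono ws hp (k := k) (a := j+1) (b := t) (by omega) h1t h2t
          omega
        · refine ⟨hbr.1, ?_⟩
          rw [hgetj1, hgetj2]
          have := hbr.2
          push_cast
          omega
      · rw [if_neg]
        · have hm' : ws.length - (j+1) = m := by omega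
          rw [← hm']
          apply ih (j+1) hm' (by omega) (by omega)
          · intro j' hj1 hj2
            rcases Nat.lt_or_ge j' j with h | h
            · exact hchain j' hj1 h
            · have : j' = j := by omega
              subst this; exact hstrict
          · intro hjn2
            by_cases h : Cc ws k (j+1) < i
            · exact absurd ⟨hjn2, h⟩ hbr
            · omega
        · intro hcon
          rcases hcon with ⟨hlt, hval⟩
          rw [hgetj1] at hval
          rw [stJ_getD ws k i (j+1) (j+1) hlt] at hval
          have h1 : ¬ j + 1 < k := by omega
          have h2 : ¬ j + 1 < j + 1 := by omega
          have h3 : j + 1 ≠ k := by omega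
          simp only [h1, if_false, h2, if_false, h3, if_false] at hval
          have : Cc ws k (j+1) < i := by omega
          exact hbr ⟨hlt, this⟩
    · -- the common prefix ends exactly at column i: the loop breaks without touching index j
      have hcc : Cc ws k j = i := by omega
      have hkj' : k < j := by
        rcases Nat.lt_or_ge k j with h | h
        · exact h
        · have : k = j := by omega
          subst this
          omega
      have hfin : stJ ws k i j = stI ws k (i+1) := by
        apply stJ_succ_eq_stI ws k i j hk hik (Or.inl hkj')
        intro t h1t h2t
        have := cc_mono ws hp (k := k) (a := j) (b := t) (by omega) h1t h2t
        omega
      by_cases hlj : (Wc ws j).length ≤ i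
      · have hc1 : PySem.Str.len (ws.getD j "") ≤ (i : Int) := by
          rw [PySem.Str.len_eq]
          exact_mod_cast hlj
        simp only [pyJloop, if_pos hc1]
        exact hfin
      · have hc1 : ¬ PySem.Str.len (ws.getD j "") ≤ (i : Int) := by
          rw [PySem.Str.len_eq]
          exact_mod_cast not_le.mpr (by exact_mod_cast Nat.lt_of_not_le hlj)
        have hr : Cc ws k j = lcpChars (Wc ws k) (Wc ws j) := rfl
        have hne := lcp_get_ne (Wc ws k) (Wc ws j) (by omega) (by omega)
        have hc2 : PySem.Str.pyGet? (ws.getD j "") (i : Int) ≠ PySem.Str.pyGet? (ws.getD k "") (i : Int) := by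
          rw [pyGet_bridge ws j i (by omega), pyGet_bridge ws k i hik, Ne, Option.some.injEq]
          rw [← hr, hcc] at hne
          intro h
          exact hne h.symm
        simp only [pyJloop, if_neg hc1, if_pos hc2]
        exact hfin

theorem stI_getD (ws : List String) (k i t : Nat) (ht : t < ws.length) :
    (stI ws k i).getD t 0 = if t < k then (fV ws t : Int)
      else if t = k then (i : Int) else (min i (Cc ws k t) : Int) :=
  PySem.List.getD_map_range _ _ _ _ ht

theorem stI_eq_stJ (ws : List String) (k i : Nat) : stI ws k i = stJ ws k i k := by
  apply List.map_congr_left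
  intro t _
  by_cases h1 : t < k
  · simp [h1]
  · simp [h1]

theorem iloop_go (ws : List String) (hp : SortedW ws) (n k : Nat) (hn : n = ws.length)
    (hk : k + 1 < n) :
    ∀ m i, (Wc ws k).length - i = m → i ≤ (Wc ws k).length →
      pyIloop ws n k ((Wc ws k).length : Int) m (i : Int) (stI ws k i)
        = stI ws k (min (Wc ws k).length (max i (Cc ws k (k+1)) + 1)) := by
  subst hn
  intro m
  induction m with
  | zero =>
    intro i hm hi
    have hieq : i = (Wc ws k).length := by omega
    have : min (Wc ws k).length (max i (Cc ws k (k+1)) + 1) = i := by omega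
    rw [this]
    rfl
  | succ m ih =>
    intro i hm hi
    have hiL : i < (Wc ws k).length := by omega
    have hkn : k < ws.length := by omega
    have hj : pyJloop ws ws.length k (i : Int) (ws.length - k) k (stI ws k i) = stI ws k (i+1) := by
      rw [stI_eq_stJ]
      exact jloop_go ws hp ws.length k i rfl hkn hiL (ws.length - k) k rfl le_rfl (by omega)
        (fun j' h1 h2 => absurd (lt_of_le_of_lt h1 h2) (lt_irrefl _))
        (fun _ => by
          have : Cc ws k k = (Wc ws k).length := lcp_self _
          omega)
    show pyIloop ws ws.length k _ (m+1) _ _ = _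
    simp only [pyIloop]
    rw [hj]
    have hgk : (stI ws k (i+1)).getD k 0 = ((i+1 : Nat) : Int) := by
      rw [stI_getD ws k (i+1) k hkn]
      simp
    have hgk1 : (stI ws k (i+1)).getD (k+1) 0 = (min (i+1) (Cc ws k (k+1)) : Int) := by
      rw [stI_getD ws k (i+1) (k+1) (by omega)]
      have h1 : ¬ k + 1 < k := by omega
      have h2 : k + 1 ≠ k := by omega
      simp [h1, h2]
    by_cases hbr : Cc ws k (k+1) ≤ i
    · rw [if_pos]
      · have : min (Wc ws k).length (max i (Cc ws k (k+1)) + 1) = i + 1 := by omega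
        rw [this]
      · rw [hgk, hgk1]
        push_cast
        omega
    · rw [if_neg]
      · have heq := ih (i+1) (by omega) (by omega)
        push_cast at heq
        rw [heq]
        have : min (Wc ws k).length (max (i+1) (Cc ws k (k+1)) + 1)
             = min (Wc ws k).length (max i (Cc ws k (k+1)) + 1) := by omega
        rw [← this]
      · rw [hgk, hgk1]
        push_cast
        omega

theorem stA_getD (ws : List String) (k t : Nat) (ht : t < ws.length) :
    (stA ws k).getD t 0 = if t < k then (fV ws t : Int)
      else if k = 0 then 0 else (Cc ws (k-1) t : Int) :=
  PySem.List.getD_map_range _ _ _ _ ht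

theorem stA_eq_stI (ws : List String) (hp : SortedW ws) (k : Nat) (hk : k < ws.length) :
    stA ws k = stI ws k (if k = 0 then 0 else Cc ws (k-1) k) := by
  apply List.map_congr_left
  intro t htm
  have ht : t < ws.length := List.mem_range.mp htm
  by_cases h1 : t < k
  · simp [h1]
  · by_cases h2 : t = k
    · simp [h1, h2]
    · have h3 : k < t := by omega
      simp only [h1, if_false, h2, if_false]
      by_cases h0 : k = 0
      · simp [h0]
      · simp only [h0, if_false]
        have hch := cc_chain ws hp (a := k-1) (b := k) (c := t) (by omega) (by omega) ht
        rw [hch]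
        push_cast
        omega

theorem wloop_go (ws : List String) (hp : SortedW ws) (n : Nat) (hn : n = ws.length) :
    ∀ fuel k, n ≤ fuel + k + 1 → k + 1 ≤ n ∨ (k = 0 ∧ n = 0) →
      pyWloop ws n fuel k (stA ws k) = stA ws (n - 1) := by
  subst hn
  intro fuel
  induction fuel with
  | zero =>
    intro k h1 h2
    show stA ws k = stA ws (ws.length - 1)
    rcases h2 with h2 | ⟨h2, h3⟩
    · have : k = ws.length - 1 := by omega
      rw [this]
    · rw [h2, h3]
  | succ fuel ih =>
    intro k h1 h2
    show pyWloop ws ws.length (fuel+1) k (stA ws k) = stA ws (ws.length - 1)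
    by_cases hk : k + 1 < ws.length
    · simp only [pyWloop, if_pos hk]
      have hkn : k < ws.length := by omega
      set sN : Nat := if k = 0 then 0 else Cc ws (k-1) k with hsN
      clear_value sN
      have hsle : sN ≤ (Wc ws k).length := by
        rw [hsN]
        by_cases h0 : k = 0
        · simp [h0]
        · simp only [h0, if_false]
          exact lcp_le_right _ _
      have hgd : (stA ws k).getD k 0 = (sN : Int) := by
        rw [stA_getD ws k k hkn, hsN]
        by_cases h0 : k = 0 <;> simp [h0]
      have hL : PySem.Str.len (ws.getD k "") = ((Wc ws k).length : Int) := by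
        rw [PySem.Str.len_eq]; rfl
      have htn : ((((Wc ws k).length : Int)) - (sN : Int)).toNat = (Wc ws k).length - sN := by
        omega
      rw [hgd, hL, htn, stA_eq_stI ws hp k hkn, ← hsN]
      have hil := iloop_go ws hp ws.length k rfl hk ((Wc ws k).length - sN) sN rfl hsle
      rw [hil]
      have hnext : stI ws k (min (Wc ws k).length (max sN (Cc ws k (k+1)) + 1)) = stA ws (k+1) := by
        apply List.map_congr_left
        intro t htm
        have ht : t < ws.length := List.mem_range.mp htm
        by_cases hc1 : t < k
        · have hc1' : t < k + 1 := by omega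
          simp [hc1, hc1']
        · by_cases hc2 : t = k
          · subst hc2
            have hc2' : t < t + 1 := by omega
            simp only [hc1, if_false, if_pos rfl, hc2', if_true]
            unfold fV
            rw [← hsN]
          · have hc3 : ¬ t < k + 1 := by omega
            have hc4 : k + 1 ≠ 0 := by omega
            simp only [hc1, if_false, hc2, if_false, hc3, hc4]
            have hm1 := cc_mono ws hp (k := k) (a := k+1) (b := t) (by omega) (by omega) ht
            have hm2 : Cc ws k t ≤ (Wc ws k).length := lcp_le_left _ _
            have : Nat.add k 1 - 1 = k := rfl
            rw [this]
            have hv : min (min (Wc ws k).length (max sN (Cc ws k (k+1)) + 1)) (Cc ws k t)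
                = Cc ws k t :=
              Nat.min_eq_right (le_min hm2
                (le_trans (le_trans hm1 (le_max_right sN _)) (Nat.le_succ _)))
            rw [← Nat.cast_min, hv]
      rw [hnext]
      exact ih (k+1) (by omega) (by omega)
    · simp only [pyWloop, if_neg hk]
      rcases h2 with h2 | ⟨h2, h3⟩
      · have : k = ws.length - 1 := by omega
        rw [this]
      · rw [h2, h3]

theorem stA_zero (ws : List String) : stA ws 0 = List.replicate ws.length (0 : Int) := by
  unfold stA
  rw [show (fun j => if j < 0 then (fV ws j : Int) else if 0 = 0 then 0 else (Cc ws (0-1) j : Int))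
      = (fun _ : Nat => (0 : Int)) by funext j; simp]
  rw [List.map_const', List.length_range]

-- the same stable sort, stated with Mathlib's linear-order instances on List Char
theorem sorted_inst_bridge (words : List String) :
    PySem.List.sorted words (fun s => s.toList) false
      = @PySem.List.sorted String (List Char) (@List.instLinearOrder Char _).toLT
          (@LinearOrder.toDecidableLT _ (@List.instLinearOrder Char _)) words (fun s => s.toList) false := by
  rw [PySem.List.sorted_eq_foldl_insertBy,
    @PySem.List.sorted_eq_foldl_insertBy String (List Char) (@List.instLinearOrder Char _).toLT
      (@LinearOrder.toDecidableLT _ (@List.instLinearOrder Char _)) words (fun s => s.toList)]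
  congr 1
  funext a b
  congr 1
  funext x y
  apply decide_eq_decide.mpr
  exact List.lt_iff_lex_lt _ _

theorem sortedw (words : List String) : SortedW (PySem.List.sorted words (fun s => s.toList) false) := by
  unfold SortedW
  rw [sorted_inst_bridge]
  exact PySem.List.sorted_pairwise words (fun s => s.toList)

theorem solution_char (words : List String) (h2 : 2 ≤ (PySem.List.sorted words (fun s => s.toList) false).length) :
    solution words =
      (stA (PySem.List.sorted words (fun s => s.toList) false)
        ((PySem.List.sorted words (fun s => s.toList) false).length - 1)).sum + 1 := by
  simp only [solution]
  rw [← stA_zero]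
  rw [wloop_go _ (sortedw words) _ rfl _ 0 (by omega) (Or.inl (by omega))]

theorem solution_small (words : List String) (h1 : (PySem.List.sorted words (fun s => s.toList) false).length ≤ 1) :
    solution words = 1 := by
  simp only [solution]
  rcases Nat.le_one_iff_eq_zero_or_eq_one.mp h1 with h | h <;> rw [h] <;> rfl

-- per-word cost used by B, as a function of the sorted list
def gB (ws : List String) (j : Nat) : Nat :=
  min (Wc ws j).length
    (max (if 0 < j then Cc ws (j-1) j else 0) (if j + 1 < ws.length then Cc ws j (j+1) else 0) + 1)

theorem alt_char (words : List String) :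
    solution_alt words =
      ((List.range ((PySem.List.sorted words (fun s => s.toList) false).length - 1)).map
        (fun j => (fV (PySem.List.sorted words (fun s => s.toList) false) j : Int))).sum
      + (if 2 ≤ (PySem.List.sorted words (fun s => s.toList) false).length
         then (Cc (PySem.List.sorted words (fun s => s.toList) false)
            ((PySem.List.sorted words (fun s => s.toList) false).length - 2)
            ((PySem.List.sorted words (fun s => s.toList) false).length - 1) : Int) else 0)
      + 1 := by
  simp only [solution_alt]
  rw [PySem.List.foldl_add]
  have hsum : (List.map (fun j =>
      (min ((PySem.List.sorted words (fun s => s.toList) false).getD j "").toList.length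
        (max (if 0 < j then ((List.range ((PySem.List.sorted words (fun s => s.toList) false).length - 1)).map
            (fun j => lcpChars ((PySem.List.sorted words (fun s => s.toList) false).getD j "").toList
              ((PySem.List.sorted words (fun s => s.toList) false).getD (j+1) "").toList)).getD (j-1) 0 else 0)
          (((List.range ((PySem.List.sorted words (fun s => s.toList) false).length - 1)).map
            (fun j => lcpChars ((PySem.List.sorted words (fun s => s.toList) false).getD j "").toList
              ((PySem.List.sorted words (fun s => s.toList) false).getD (j+1) "").toList)).getD j 0) + 1) : Int))
      (List.range ((PySem.List.sorted words (fun s => s.toList) false).length - 1)))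
    = (List.range ((PySem.List.sorted words (fun s => s.toList) false).length - 1)).map
        (fun j => (fV (PySem.List.sorted words (fun s => s.toList) false) j : Int)) := by
    apply List.map_congr_left
    intro j hjm
    have hj : j < (PySem.List.sorted words (fun s => s.toList) false).length - 1 :=
      List.mem_range.mp hjm
    have hnx : ((List.range ((PySem.List.sorted words (fun s => s.toList) false).length - 1)).map
        (fun j => lcpChars ((PySem.List.sorted words (fun s => s.toList) false).getD j "").toList
          ((PySem.List.sorted words (fun s => s.toList) false).getD (j+1) "").toList)).getD j 0
        = Cc (PySem.List.sorted words (fun s => s.toList) false) j (j+1) := by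
      rw [PySem.List.getD_map_range _ _ _ _ (by omega)]
      rfl
    have hmx : (if 0 < j then ((List.range ((PySem.List.sorted words (fun s => s.toList) false).length - 1)).map
        (fun j => lcpChars ((PySem.List.sorted words (fun s => s.toList) false).getD j "").toList
          ((PySem.List.sorted words (fun s => s.toList) false).getD (j+1) "").toList)).getD (j-1) 0 else 0)
        = (if j = 0 then 0 else Cc (PySem.List.sorted words (fun s => s.toList) false) (j-1) j) := by
      by_cases h0 : 0 < j
      · rw [if_pos h0, if_neg (by omega)]
        rw [PySem.List.getD_map_range _ _ _ _ (by omega)]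
        have : j - 1 + 1 = j := by omega
        rw [this]
        rfl
      · rw [if_neg h0, if_pos (by omega)]
    rw [hnx, hmx]
    unfold fV Wc
    push_cast
    rfl
  rw [hsum]
  by_cases h2 : 2 ≤ (PySem.List.sorted words (fun s => s.toList) false).length
  · rw [if_pos h2, if_pos h2]
    rw [PySem.List.getD_map_range _ _ _ _ (by omega)]
    have : (PySem.List.sorted words (fun s => s.toList) false).length - 2 + 1
        = (PySem.List.sorted words (fun s => s.toList) false).length - 1 := by omega
    rw [this]
    have hr : lcpChars
        ((PySem.List.sorted words (fun s => s.toList) false).getD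
          ((PySem.List.sorted words (fun s => s.toList) false).length - 2) "").toList
        ((PySem.List.sorted words (fun s => s.toList) false).getD
          ((PySem.List.sorted words (fun s => s.toList) false).length - 1) "").toList
        = Cc (PySem.List.sorted words (fun s => s.toList) false)
            ((PySem.List.sorted words (fun s => s.toList) false).length - 2)
            ((PySem.List.sorted words (fun s => s.toList) false).length - 1) := rfl
    rw [hr]
    ring
  · rw [if_neg h2, if_neg h2]
    ring

theorem sum_stA (ws : List String) (_hp : SortedW ws) (h2 : 2 ≤ ws.length) :
    (stA ws (ws.length - 1)).sum
      = ((List.range (ws.length - 1)).map (fun j => (fV ws j : Int))).sum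
        + (Cc ws (ws.length - 2) (ws.length - 1) : Int) := by
  have hsp : List.range ws.length = List.range (ws.length - 1) ++ [ws.length - 1] := by
    conv_lhs => rw [show ws.length = (ws.length - 1) + 1 by omega]
    rw [List.range_succ]
  unfold stA
  rw [hsp, List.map_append, List.sum_append]
  congr 1
  · apply congrArg
    apply List.map_congr_left
    intro t htm
    have ht : t < ws.length - 1 := List.mem_range.mp htm
    simp [ht]
  · have hne : ¬ (ws.length - 1 < ws.length - 1) := by omega
    have h0 : ¬ (ws.length - 1 = 0) := by omega
    simp only [List.map_cons, List.map_nil, List.sum_cons, List.sum_nil, add_zero,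
      hne, if_false, h0]
    have : ws.length - 1 - 1 = ws.length - 2 := by omega
    rw [this]

-- ===== VERDICT (by name: the statement is the Claim_ definition above) =====
theorem solution_spec : Claim_equal_solution := by
  intro words _hdom
  unfold Spec_solution
  rw [alt_char words]
  by_cases h2 : 2 ≤ (PySem.List.sorted words (fun s => s.toList) false).length
  · rw [solution_char words h2, sum_stA _ (sortedw words) h2, if_pos h2]
  · rw [solution_small words (by omega), if_neg h2]
    have h0 : (PySem.List.sorted words (fun s => s.toList) false).length - 1 = 0 := by omega
    rw [h0]
    simp
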